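-- pv_equiv track=rewrite | github.com/joonhankim/BAEKJOON_Python | 함수/#1065.py | get_hansu
-- ===== SOURCE A (Python) =====
-- def get_hansu(N:int) -> int:
--     han_su = 0
--     for i in range(1,N+1):
--         num_list = list(map(int,str(i)))
--         if i < 100:
--             han_su += 1
--         elif num_list[0] - num_list[1] == num_list[1] - num_list[2]:
--             han_su +=1
--     return han_su
-- ===== SOURCE B (Python) =====
-- def get_hansu(N: int) -> int:
--     # Every i < 100 is a hansu; for larger i only the first three digits matter,
--     # so count by 3-digit prefix blocks instead of scanning every number.
--     if N < 100:
--         return N if N > 0 else 0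
--     block = 10 ** (len(str(N)) - 3)
--     P = N // block
--     # all numbers below the current digit-length: 99 small ones plus 45 hansu
--     # prefixes per completed length (45 * (1 + 10 + ... ) = 5 * (block - 1) * 9/9)
--     total = 99 + 5 * (block - 1)
--     for p in range(100, P):
--         if p // 100 + p % 10 == 2 * (p // 10 % 10):
--             total += block
--     if P // 100 + P % 10 == 2 * (P // 10 % 10):
--         total += N - P * block + 1
--     return total
-- ===== Notes on version B (the rewrite author's own statement) =====
-- stated objective: faster
-- what changed: Instead of testing every number from 1 to N, B counts by 3-digit prefix blocks: 45 arithmetic prefixes per completed digit length in closed form plus one scan over at most 900 prefixes for the top length.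
import Mathlib
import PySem

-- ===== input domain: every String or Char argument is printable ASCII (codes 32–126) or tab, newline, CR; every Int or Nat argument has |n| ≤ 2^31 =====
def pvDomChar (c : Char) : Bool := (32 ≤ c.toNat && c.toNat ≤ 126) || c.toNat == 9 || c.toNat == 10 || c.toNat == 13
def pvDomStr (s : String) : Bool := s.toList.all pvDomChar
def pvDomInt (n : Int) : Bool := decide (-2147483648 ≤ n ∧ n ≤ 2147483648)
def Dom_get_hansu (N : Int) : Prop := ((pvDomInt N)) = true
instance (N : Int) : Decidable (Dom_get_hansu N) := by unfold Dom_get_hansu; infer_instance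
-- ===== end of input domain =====

-- B counts hansu numbers by 3-digit prefix blocks (closed form per completed digit
-- length plus one ≤900-step prefix scan) instead of testing every number up to N: faster.

-- ===== PORT A =====
-- list(map(int, str(i))): int(ch) is PySem.Int.ofChars? [ch]; it is `some` on every
-- digit char produced by str(i) for i ≥ 1, so `.getD 0` is an unreachable default.
-- num_list[j] (j = 0,1,2) is PySem.List.pyGet?; for i ≥ 100 str(i) has ≥ 3 chars,
-- so the IndexError case (none) is unreachable and `.getD 0` is a dead default.
def get_hansu (N : Int) : Int :=
  (PySem.List.pyRange 1 (N + 1)).foldl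
    (fun han_su i =>
      let num_list : List Int := (PySem.Int.toChars i).map (fun c => (PySem.Int.ofChars? [c]).getD 0)
      if i < 100 then
        han_su + 1
      else if (PySem.List.pyGet? num_list 0).getD 0 - (PySem.List.pyGet? num_list 1).getD 0
              = (PySem.List.pyGet? num_list 1).getD 0 - (PySem.List.pyGet? num_list 2).getD 0 then
        han_su + 1
      else
        han_su)
    0

-- ===== PORT B =====
-- len(str(N)) ≥ 3 whenever N ≥ 100, so the Int subtraction `- 3` stays nonnegative;
-- `.toNat` makes it a legal exponent (exact here).
def get_hansu_alt (N : Int) : Int :=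
  if N < 100 then (if N > 0 then N else 0)
  else
    let block : Int := 10 ^ (PySem.Str.len (PySem.Int.toStr N) - 3).toNat
    let P : Int := PySem.Int.floordiv N block
    let total : Int := 99 + 5 * (block - 1)
    let total := (PySem.List.pyRange 100 P).foldl
      (fun t p =>
        if PySem.Int.floordiv p 100 + PySem.Int.mod p 10
            = 2 * PySem.Int.mod (PySem.Int.floordiv p 10) 10 then t + block else t)
      total
    if PySem.Int.floordiv P 100 + PySem.Int.mod P 10
        = 2 * PySem.Int.mod (PySem.Int.floordiv P 10) 10 then
      total + (N - P * block + 1)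
    else
      total

-- ===== PRECONDITION & SPEC =====
def Spec_get_hansu (N : Int) (out : Int) : Prop := out = get_hansu_alt N
instance (N : Int) (out : Int) : Decidable (Spec_get_hansu N out) := by unfold Spec_get_hansu; infer_instance

-- ===== CLAIM (what is proved, stated in full; the proofs are below) =====
def Claim_equal_get_hansu : Prop := ∀ (N : Int), Dom_get_hansu N → Spec_get_hansu N (get_hansu N)

-- ===== LEMMAS AND PROOFS =====

-- Reference (proof-only) arithmetic model over ℕ.
-- `apN p`: the three digits of the 3-digit number p form an arithmetic progression.
def apN (p : ℕ) : Bool := p / 100 + p % 10 == 2 * (p / 10 % 10)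
-- number of p in [100, x] with apN p
def cntAp (x : ℕ) : ℕ := (List.range' 100 (x + 1 - 100)).countP apN
-- 10^(number of digits - 3) for n ≥ 100
def blkN (n : ℕ) : ℕ := 10 ^ (Nat.log 10 n - 2)
-- leading-3-digit prefix of n
def preN (n : ℕ) : ℕ := n / blkN n
-- indicator: i is a hansu number
def indN (i : ℕ) : ℕ := if i < 100 then 1 else if apN (preN i) then 1 else 0
-- closed form for the count of hansu numbers in [1, n]
def closedN (n : ℕ) : ℕ :=
  if n < 100 then n
  else 99 + 5 * (blkN n - 1) + blkN n * cntAp (preN n - 1)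
         + (if apN (preN n) then n - preN n * blkN n + 1 else 0)
-- running count: Σ_{i=1}^{n} indN i
def SN (n : ℕ) : ℕ := ((List.range n).map (fun k => indN (k + 1))).sum

lemma cntAp_succ (x : ℕ) (hx : 100 ≤ x) :
    cntAp x = cntAp (x - 1) + (if apN x then 1 else 0) := by
  unfold cntAp
  have h1 : x + 1 - 100 = (x - 100) + 1 := by omega
  have h2 : x - 1 + 1 - 100 = x - 100 := by omega
  rw [h1, h2, List.range'_1_concat, List.countP_append]
  have h3 : 100 + (x - 100) = x := by omega
  rw [h3]
  simp [List.countP_cons]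

set_option maxRecDepth 40000 in
lemma cntAp_998 : cntAp 998 = 44 := by decide

lemma log10_eq {n k : ℕ} (h1 : 10 ^ k ≤ n) (h2 : n < 10 ^ (k+1)) : Nat.log 10 n = k := by
  have hn : n ≠ 0 := by
    have := Nat.one_le_iff_ne_zero.mp (le_trans (Nat.one_le_pow _ _ (by norm_num)) h1); omega
  exact (Nat.log_eq_iff (Or.inr ⟨by norm_num, hn⟩)).mpr ⟨h1, h2⟩

lemma closedN_step (n : ℕ) : closedN (n + 1) = closedN n + indN (n + 1) := by
  by_cases h99 : n + 1 < 100
  · simp [closedN, indN, h99]; omega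
  by_cases h100 : n + 1 = 100
  · have hn : n = 99 := by omega
    subst hn
    have hlog : Nat.log 10 100 = 2 := log10_eq (by norm_num) (by norm_num)
    have hblk : blkN 100 = 1 := by simp [blkN, hlog]
    have hpre : preN 100 = 100 := by simp [preN, hblk]
    have hap : apN 100 = false := by decide
    have hcnt : cntAp 99 = 0 := by decide
    simp [closedN, indN, hblk, hpre, hap, hcnt]
  have h101 : 101 ≤ n + 1 := by omega
  have hk1 : 10 ^ Nat.log 10 (n+1) ≤ n + 1 := Nat.pow_log_le_self 10 (by omega)
  have hk2 : n + 1 < 10 ^ (Nat.log 10 (n+1) + 1) := Nat.lt_pow_succ_log_self (by norm_num) _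
  have hk3 : 2 ≤ Nat.log 10 (n+1) :=
    (Nat.le_log_iff_pow_le (by norm_num) (by omega)).mpr (by norm_num; omega)
  obtain ⟨k, hkdef⟩ : ∃ k, Nat.log 10 (n+1) = k := ⟨_, rfl⟩
  rw [hkdef] at hk1 hk2 hk3
  by_cases hb : n + 1 = 10 ^ k
  · -- boundary: n + 1 = 10^k, k ≥ 3
    have hk4 : 3 ≤ k := by
      by_contra h
      have : k = 2 := by omega
      rw [this] at hb; norm_num at hb; omega
    obtain ⟨m, rfl⟩ : ∃ m, k = m + 3 := ⟨k - 3, by omega⟩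
    have hpm : (0:ℕ) < 10 ^ m := Nat.pow_pos (by norm_num)
    have hsplit : (10:ℕ) ^ (m+3) = 1000 * 10 ^ m := by ring
    have hsplit2 : (10:ℕ) ^ (m+2) = 100 * 10 ^ m := by ring
    have hlogn : Nat.log 10 n = m + 2 := log10_eq (by omega) (by omega)
    have hblk1 : blkN (n+1) = 10 ^ (m+1) := by simp [blkN, hkdef]
    have hblk2 : blkN n = 10 ^ m := by simp [blkN, hlogn]
    have hpre1 : preN (n+1) = 100 := by
      have h3 : (10:ℕ) ^ (m+3) = 10 ^ (m+1) * 100 := by ring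
      unfold preN
      rw [hblk1, hb, h3, Nat.mul_div_cancel_left _ (by positivity)]
    have hn_eq : n = 10 ^ m * 999 + (10 ^ m - 1) := by omega
    have hpre2 : preN n = 999 := by
      unfold preN
      rw [hblk2, hn_eq, Nat.mul_add_div hpm, Nat.div_eq_of_lt (by omega)]
    have hap1 : apN 100 = false := by decide
    have hap2 : apN 999 = true := by decide
    have hcnt99 : cntAp 99 = 0 := by decide
    simp [closedN, indN, show ¬ (n+1<100) by omega, show ¬ (n<100) by omega,
          hblk1, hblk2, hpre1, hpre2, hap1, hap2, hcnt99, cntAp_998]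
    have e1 : (10:ℕ)^(m+1) = 10 * 10^m := by ring
    omega
  · -- non-boundary
    have hlogn : Nat.log 10 n = k := log10_eq (by omega) (by omega)
    obtain ⟨k', rfl⟩ : ∃ k', k = k' + 2 := ⟨k - 2, by omega⟩
    obtain ⟨B, hB⟩ : ∃ B, (10:ℕ) ^ k' = B := ⟨_, rfl⟩
    have hBpos : 0 < B := hB ▸ Nat.pow_pos (by norm_num)
    have hblk1 : blkN (n+1) = B := by simp [blkN, hkdef]; exact hB
    have hblk2 : blkN n = B := by simp [blkN, hlogn]; exact hB
    have hpow2 : (10:ℕ) ^ (k'+2) = 100 * B := by rw [← hB]; ring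
    have hpow3 : (10:ℕ) ^ (k'+2+1) = 1000 * B := by rw [← hB]; ring
    obtain ⟨P, hPdef⟩ : ∃ P, (n+1) / B = P := ⟨_, rfl⟩
    have hdm : B * P + (n+1) % B = n + 1 := by rw [← hPdef]; exact Nat.div_add_mod _ _
    have hr : (n+1) % B < B := Nat.mod_lt _ hBpos
    have hP1 : 100 ≤ P := by
      rw [← hPdef, Nat.le_div_iff_mul_le hBpos]; omega
    have hP2 : P < 1000 := by
      rw [← hPdef, Nat.div_lt_iff_lt_mul hBpos]; omega
    have hpre1 : preN (n+1) = P := by unfold preN; rw [hblk1]; exact hPdef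
    by_cases hr0 : (n+1) % B = 0
    · -- B divides n+1 : n+1 = B * P, P ≥ 101
      have hnP : n + 1 = B * P := by omega
      have hP101 : 101 ≤ P := by
        rcases Nat.lt_or_ge P 101 with h | h
        · exfalso; have : P = 100 := by omega
          rw [this] at hnP; apply hb; omega
        · exact h
      obtain ⟨Q, rfl⟩ : ∃ Q, P = Q + 1 := ⟨P - 1, by omega⟩
      have hmul : B * (Q + 1) = B * Q + B := by ring
      have hmul2 : Q * B = B * Q := by ring
      have hmul3 : (Q + 1) * B = B * Q + B := by ring
      have hpre2 : preN n = Q := by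
        have hn_eq : n = B * Q + (B - 1) := by omega
        unfold preN
        rw [hblk2, hn_eq, Nat.mul_add_div hBpos, Nat.div_eq_of_lt (by omega)]
        omega
      have hcnt : cntAp (Q + 1 - 1) = cntAp (Q - 1) + (if apN Q then 1 else 0) := by
        simpa using cntAp_succ Q (by omega)
      simp only [closedN, indN, show ¬ (n+1<100) by omega, show ¬ (n<100) by omega,
          hblk1, hblk2, hpre1, hpre2, hcnt, Nat.mul_add, if_false]
      by_cases ha1 : apN (Q+1) <;> by_cases ha2 : apN Q <;>
        simp only [ha1, ha2, if_true, if_false, Bool.false_eq_true] <;> omega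
    · -- same prefix P
      have hmul : P * B = B * P := by ring
      have hpre2 : preN n = P := by
        have hn_eq : n = B * P + ((n+1) % B - 1) := by omega
        unfold preN
        rw [hblk2, hn_eq, Nat.mul_add_div hBpos, Nat.div_eq_of_lt (by omega)]
        omega
      simp only [closedN, indN, show ¬ (n+1<100) by omega, show ¬ (n<100) by omega,
          hblk1, hblk2, hpre1, hpre2]
      by_cases ha1 : apN P <;> simp only [ha1, if_true, if_false, Bool.false_eq_true]
      all_goals omega

lemma SN_succ (n : ℕ) : SN (n + 1) = SN n + indN (n + 1) := by
  simp [SN, List.range_succ]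

lemma SN_eq_closedN (n : ℕ) : SN n = closedN n := by
  induction n with
  | zero => simp [SN, closedN]
  | succ n ih => rw [SN_succ, ih, closedN_step]

lemma toDigitsCore_eq (f : ℕ) : ∀ (n : ℕ) (acc : List Char), 0 < n → n < f →
    Nat.toDigitsCore 10 f n acc = ((Nat.digits 10 n).map Nat.digitChar).reverse ++ acc := by
  induction f with
  | zero => intro n acc h1 h2; omega
  | succ f ih =>
    intro n acc h1 h2
    rw [Nat.toDigitsCore]
    by_cases h : n / 10 = 0
    · have hn10 : n < 10 := by omega
      simp [h, Nat.digits_of_lt 10 n (by omega) hn10, Nat.mod_eq_of_lt hn10]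
    · have h10 : 10 ≤ n := by omega
      simp only [h, if_false]
      rw [ih (n / 10) _ (by omega)
            (by have := Nat.div_lt_self (show 0 < n by omega) (show 1 < 10 by norm_num); omega)]
      rw [Nat.digits_def' (by norm_num : (1:ℕ) < 10) h1]
      simp

lemma toChars_eq_digits (n : ℕ) (hn : 0 < n) :
    PySem.Int.toChars (n : ℤ) = ((Nat.digits 10 n).map Nat.digitChar).reverse := by
  unfold PySem.Int.toChars
  rw [if_neg (by omega)]
  simp only [Int.toNat_natCast]
  rw [Nat.toDigits, toDigitsCore_eq (n+1) n [] hn (by omega)]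
  simp

lemma ofChars_digitChar (d : ℕ) (hd : d < 10) :
    (PySem.Int.ofChars? [Nat.digitChar d]).getD 0 = (d : ℤ) := by
  interval_cases d <;> decide

lemma numList_eq (n : ℕ) (hn : 0 < n) :
    (PySem.Int.toChars (n : ℤ)).map (fun c => (PySem.Int.ofChars? [c]).getD 0)
      = (List.map (fun d : ℕ => (d : ℤ)) (Nat.digits 10 n)).reverse := by
  rw [toChars_eq_digits n hn, List.map_reverse]
  congr 1
  rw [List.map_map]
  apply List.map_congr_left
  intro d hd
  have : d < 10 := Nat.digits_lt_base (by norm_num) hd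
  exact ofChars_digitChar d this

lemma pyGet_nat (l : List ℤ) (j : ℕ) (h : j < l.length) :
    (PySem.List.pyGet? l (j : ℤ)).getD 0 = l[j] := by
  simp [PySem.List.pyGet?, PySem.List.pyIdx?, h]

lemma pyGet_nat' (l : List ℤ) (i : ℤ) (j : ℕ) (hij : i = (j : ℤ)) (h : j < l.length) :
    (PySem.List.pyGet? l i).getD 0 = l[j] := by
  subst hij; exact pyGet_nat l j h

lemma cond_eq_apN (n : ℕ) (hn : 100 ≤ n) :
    (let num_list := (List.map (fun d : ℕ => (d : ℤ)) (Nat.digits 10 n)).reverse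
     (PySem.List.pyGet? num_list 0).getD 0 - (PySem.List.pyGet? num_list 1).getD 0
        = (PySem.List.pyGet? num_list 1).getD 0 - (PySem.List.pyGet? num_list 2).getD 0)
      ↔ apN (preN n) = true := by
  have hL2 : 2 ≤ Nat.log 10 n :=
    (Nat.le_log_iff_pow_le (by norm_num) (by omega)).mpr (by norm_num; omega)
  obtain ⟨L, hLdef⟩ : ∃ L, Nat.log 10 n = L := ⟨_, rfl⟩
  rw [hLdef] at hL2
  have hlen : (Nat.digits 10 n).length = L + 1 := by
    rw [Nat.length_digits 10 n (by norm_num) (by omega), hLdef]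
  have hnlt : n < 10 ^ (L + 1) := by
    have := Nat.lt_pow_succ_log_self (show 1 < 10 by norm_num) n
    rwa [hLdef] at this
  have hlenr : ((List.map (fun d : ℕ => (d : ℤ)) (Nat.digits 10 n)).reverse).length = L + 1 := by
    simp [hlen]
  have hget : ∀ (j : ℕ) (hj : j < 3),
      ((List.map (fun d : ℕ => (d : ℤ)) (Nat.digits 10 n)).reverse)[j]'(by rw [hlenr]; omega) =
        ((n / 10 ^ (L - j) % 10 : ℕ) : ℤ) := by
    intro j hj
    rw [List.getElem_reverse]
    rw [List.getElem_map]
    have hidx : (List.map (fun d : ℕ => (d : ℤ)) (Nat.digits 10 n)).length - 1 - j = L - j := by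
      simp [hlen]
    simp only [hidx]
    congr 1
    rw [← List.getD_eq_getElem _ 0 (by omega), Nat.getD_digits n (L - j) (by norm_num)]
  simp only []
  rw [pyGet_nat' _ 0 0 (by norm_num) (by rw [hlenr]; omega),
      pyGet_nat' _ 1 1 (by norm_num) (by rw [hlenr]; omega),
      pyGet_nat' _ 2 2 (by norm_num) (by rw [hlenr]; omega)]
  rw [hget 0 (by norm_num), hget 1 (by norm_num), hget 2 (by norm_num)]
  have hBpos : (0:ℕ) < 10 ^ (L - 2) := Nat.pow_pos (by norm_num)
  have hpre : preN n = n / 10 ^ (L - 2) := by simp [preN, blkN, hLdef]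
  have h1 : preN n % 10 = n / 10 ^ (L - 2) % 10 := by rw [hpre]
  have h2 : preN n / 10 % 10 = n / 10 ^ (L - 1) % 10 := by
    rw [hpre, Nat.div_div_eq_div_mul]
    congr 2
    have : (10:ℕ) ^ (L - 2) * 10 = 10 ^ (L - 1) := by
      rw [← pow_succ]; congr 1; omega
    rw [this]
  have h3 : preN n / 100 = n / 10 ^ L := by
    rw [hpre, Nat.div_div_eq_div_mul]
    congr 1
    have hL22 : L - 2 + 2 = L := by omega
    have : (10:ℕ) ^ (L - 2) * 100 = 10 ^ L := by
      calc (10:ℕ) ^ (L - 2) * 100 = 10 ^ (L - 2 + 2) := by ring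
        _ = 10 ^ L := by rw [hL22]
    rw [this]
  have h4 : n / 10 ^ L % 10 = n / 10 ^ L := by
    apply Nat.mod_eq_of_lt
    rw [Nat.div_lt_iff_lt_mul (Nat.pow_pos (by norm_num))]
    calc n < 10 ^ (L + 1) := hnlt
      _ = 10 * 10 ^ L := by ring
  have hsub0 : L - 0 = L := by omega
  rw [hsub0]
  simp only [apN, beq_iff_eq]
  rw [h1, h2, h3, h4]
  constructor
  · intro h; omega
  · intro h; omega

lemma get_hansu_nat (n : ℕ) : get_hansu (n : ℤ) = (SN n : ℤ) := by
  induction n with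
  | zero => simp [get_hansu, SN, pysem]
  | succ n ih =>
    unfold get_hansu at ih ⊢
    have hcast : ((n + 1 : ℕ) : ℤ) + 1 = ((n : ℤ) + 1) + 1 := by push_cast; ring
    rw [hcast, PySem.List.pyRange_one_succ_right (by omega), List.foldl_append, ih]
    simp only [List.foldl_cons, List.foldl_nil]
    rw [SN_succ]
    by_cases hsmall : n + 1 < 100
    · rw [if_pos (by exact_mod_cast hsmall)]
      simp [indN, hsmall]
    · rw [if_neg (by exact_mod_cast hsmall)]
      have h100 : 100 ≤ n + 1 := by omega
      have hnl : ((n : ℤ) + 1) = ((n + 1 : ℕ) : ℤ) := by push_cast; ring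
      rw [hnl, numList_eq (n + 1) (by omega)]
      have hcond := cond_eq_apN (n + 1) h100
      simp only [] at hcond
      by_cases hap : apN (preN (n + 1)) = true
      · rw [if_pos (hcond.mpr hap)]
        simp [indN, hap, show ¬ (n + 1 < 100) from hsmall]
      · rw [if_neg (fun h => hap (hcond.mp h))]
        simp [indN, hap, show ¬ (n + 1 < 100) from hsmall]

lemma condInt_iff (q : ℕ) :
    (PySem.Int.floordiv (q : ℤ) 100 + PySem.Int.mod (q : ℤ) 10
        = 2 * PySem.Int.mod (PySem.Int.floordiv (q : ℤ) 10) 10) ↔ apN q = true := by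
  rw [show (100:ℤ) = ((100:ℕ):ℤ) by norm_num, show (10:ℤ) = ((10:ℕ):ℤ) by norm_num,
      PySem.Int.floordiv_natCast, PySem.Int.mod_natCast, PySem.Int.floordiv_natCast,
      PySem.Int.mod_natCast]
  simp only [apN, beq_iff_eq]
  constructor
  · intro h; exact_mod_cast h
  · intro h; exact_mod_cast h

lemma B_loop (blk : ℤ) (m : ℕ) : ∀ (t : ℤ),
    (PySem.List.pyRange 100 ((100 + m : ℕ) : ℤ)).foldl
      (fun t p =>
        if PySem.Int.floordiv p 100 + PySem.Int.mod p 10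
            = 2 * PySem.Int.mod (PySem.Int.floordiv p 10) 10 then t + blk else t) t
      = t + blk * (((List.range' 100 m).countP apN : ℕ) : ℤ) := by
  induction m with
  | zero => intro t; simp [pysem]
  | succ m ih =>
    intro t
    have hcast : ((100 + (m + 1) : ℕ) : ℤ) = ((100 + m : ℕ) : ℤ) + 1 := by push_cast; ring
    rw [hcast, PySem.List.pyRange_one_succ_right (by push_cast; omega), List.foldl_append, ih]
    simp only [List.foldl_cons, List.foldl_nil]
    rw [List.range'_1_concat, List.countP_append]
    by_cases hap : apN (100 + m) = true
    · rw [if_pos ((condInt_iff (100 + m)).mpr hap)]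
      simp [hap]
      ring
    · rw [if_neg (fun h => hap ((condInt_iff (100 + m)).mp h))]
      simp [hap]

lemma get_hansu_alt_eq_closedN (N : Int) : get_hansu_alt N = (closedN N.toNat : ℤ) := by
  by_cases hsmall : N < 100
  · unfold get_hansu_alt
    rw [if_pos hsmall]
    by_cases hpos : N > 0
    · rw [if_pos hpos]
      have : closedN N.toNat = N.toNat := by
        unfold closedN; rw [if_pos (by omega)]
      rw [this]; omega
    · rw [if_neg hpos]
      have : N.toNat = 0 := by omega
      rw [this]; simp [closedN]
  · -- N ≥ 100
    have h100 : (100 : ℤ) ≤ N := by omega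
    obtain ⟨n, rfl⟩ : ∃ n : ℕ, N = (n : ℤ) := ⟨N.toNat, by omega⟩
    have hn100 : 100 ≤ n := by exact_mod_cast h100
    rw [Int.toNat_natCast]
    have hL2 : 2 ≤ Nat.log 10 n :=
      (Nat.le_log_iff_pow_le (by norm_num) (by omega)).mpr (by norm_num; omega)
    obtain ⟨L, hLdef⟩ : ∃ L, Nat.log 10 n = L := ⟨_, rfl⟩
    rw [hLdef] at hL2
    -- length of str(N)
    have hlen : PySem.Str.len (PySem.Int.toStr (n : ℤ)) = ((L + 1 : ℕ) : ℤ) := by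
      rw [PySem.Str.len_eq, PySem.Int.toList_toStr, toChars_eq_digits n (by omega)]
      simp [Nat.length_digits 10 n (by norm_num) (by omega), hLdef]
    have hexp : (PySem.Str.len (PySem.Int.toStr (n : ℤ)) - 3).toNat = L - 2 := by
      rw [hlen]; omega
    have hblk : blkN n = 10 ^ (L - 2) := by simp [blkN, hLdef]
    have hblkcast : (10 : ℤ) ^ (L - 2) = ((blkN n : ℕ) : ℤ) := by
      rw [hblk]; push_cast; ring
    have hBpos : 0 < blkN n := by rw [hblk]; positivity
    have hP : PySem.Int.floordiv (n : ℤ) ((blkN n : ℕ) : ℤ) = ((preN n : ℕ) : ℤ) := by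
      rw [PySem.Int.floordiv_natCast]; rfl
    have hpre100 : 100 ≤ preN n := by
      unfold preN
      rw [Nat.le_div_iff_mul_le hBpos, hblk]
      calc 100 * 10 ^ (L - 2) = 10 ^ (L - 2 + 2) := by ring
        _ = 10 ^ L := by congr 1; omega
        _ ≤ n := by rw [← hLdef]; exact Nat.pow_log_le_self 10 (by omega)
    have hpreB : preN n * blkN n ≤ n := Nat.div_mul_le_self n (blkN n)
    unfold get_hansu_alt
    rw [if_neg (by omega)]
    simp only [hexp, hblkcast, hP]
    have hm : ((preN n : ℕ) : ℤ) = ((100 + (preN n - 100) : ℕ) : ℤ) := by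
      push_cast; omega
    rw [hm, B_loop]
    have hcnt : cntAp (preN n - 1) = (List.range' 100 (preN n - 100)).countP apN := by
      unfold cntAp
      have he : preN n - 1 + 1 - 100 = preN n - 100 := by omega
      rw [he]
    rw [← hcnt, ← hm]
    have hclosed : (closedN n : ℤ)
        = 99 + 5 * (((blkN n : ℕ) : ℤ) - 1) + ((blkN n : ℕ) : ℤ) * ((cntAp (preN n - 1) : ℕ) : ℤ)
          + (if apN (preN n) = true then (n : ℤ) - ((preN n : ℕ) : ℤ) * ((blkN n : ℕ) : ℤ) + 1 else 0) := by
      unfold closedN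
      rw [if_neg (by omega)]
      by_cases hap : apN (preN n) = true
      · rw [if_pos hap, if_pos hap]
        push_cast [Nat.cast_sub (show 1 ≤ blkN n by omega), Nat.cast_sub hpreB]
        ring
      · rw [if_neg hap, if_neg hap]
        push_cast [Nat.cast_sub (show 1 ≤ blkN n by omega)]
        ring
    rw [hclosed]
    by_cases hap : apN (preN n) = true
    · rw [if_pos ((condInt_iff (preN n)).mpr hap), if_pos hap]
    · rw [if_neg (fun h => hap ((condInt_iff (preN n)).mp h)), if_neg hap]
      ring

lemma get_hansu_eq_SN (N : Int) : get_hansu N = (SN N.toNat : ℤ) := by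
  by_cases hpos : 0 < N
  · obtain ⟨n, rfl⟩ : ∃ n : ℕ, N = (n : ℤ) := ⟨N.toNat, by omega⟩
    rw [get_hansu_nat]
    congr 1
  · have hN : N.toNat = 0 := by omega
    rw [hN]
    unfold get_hansu
    have : PySem.List.pyRange 1 (N + 1) = [] := by
      have : ¬ ∃ x, x ∈ PySem.List.pyRange 1 (N + 1) := by
        rintro ⟨x, hx⟩
        rw [PySem.List.mem_pyRange_one] at hx
        omega
      cases h : PySem.List.pyRange 1 (N + 1) with
      | nil => rfl
      | cons a l => exact absurd ⟨a, h ▸ List.mem_cons_self⟩ this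
    rw [this]
    simp [SN]

-- ===== VERDICT (by name: the statement is the Claim_ definition above) =====
theorem get_hansu_spec : Claim_equal_get_hansu := by
  intro N _
  unfold Spec_get_hansu
  rw [get_hansu_eq_SN, get_hansu_alt_eq_closedN, SN_eq_closedN]
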